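-- pv_equiv track=rewrite | github.com/ondrejsilhavy1-cmd/coffee-brief-bot | brief_bot.py | sanitize_markdown
-- ===== SOURCE A (Python) =====
-- def sanitize_markdown(text):
--     # Wrap any bare URLs (not already inside markdown parentheses) as [link](url)
--     result = []
--     i = 0
--     while i < len(text):
--         http_pos = text.find('http', i)
--         if http_pos == -1:
--             result.append(text[i:])
--             break
--         result.append(text[i:http_pos])
--         if http_pos > 0 and text[http_pos - 1] == '(':
--             end_pos = http_pos
--             while end_pos < len(text) and text[end_pos] not in (' ', chr(10), ')'):
--                 end_pos += 1
--             result.append(text[http_pos:end_pos])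
--             i = end_pos
--         else:
--             end_pos = http_pos
--             while end_pos < len(text) and text[end_pos] not in (' ', chr(10), ')'):
--                 end_pos += 1
--             url = text[http_pos:end_pos]
--             result.append('[link](' + url + ')')
--             i = end_pos
--     return ''.join(result)
-- ===== SOURCE B (Python) =====
-- import re
--
-- def sanitize_markdown(text):
--     # One regex pass: each maximal run starting at 'http' (stopping at space,
--     # newline or ')') is wrapped as [link](url) unless preceded by '('.
--     def repl(m):
--         if m.start() > 0 and text[m.start() - 1] == '(':
--             return m.group(0)
--         return '[link](' + m.group(0) + ')'
--     return re.sub(r'http[^ \n)]*', repl, text)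
-- ===== Notes on version B (the rewrite author's own statement) =====
-- stated objective: idiomatic
-- what changed: Replaces the manual find/inner-while state machine with a single re.sub pass using the pattern http[^ \n)]* and a replacement callback that inspects the preceding character.
import Mathlib
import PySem

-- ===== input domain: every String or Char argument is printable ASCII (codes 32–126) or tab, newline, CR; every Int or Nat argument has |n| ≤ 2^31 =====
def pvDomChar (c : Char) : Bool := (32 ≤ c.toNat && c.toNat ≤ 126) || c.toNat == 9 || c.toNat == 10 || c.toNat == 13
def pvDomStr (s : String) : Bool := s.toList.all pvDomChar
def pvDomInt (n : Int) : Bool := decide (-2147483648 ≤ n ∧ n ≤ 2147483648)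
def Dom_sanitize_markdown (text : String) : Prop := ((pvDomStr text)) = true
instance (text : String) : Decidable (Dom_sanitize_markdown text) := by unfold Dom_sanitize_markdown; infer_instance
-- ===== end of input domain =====

-- B rewrites A's manual find/inner-while state machine as one regex-substitution
-- pass (re.sub with pattern 'http[^ \n)]*' and a callback); proved equal on all inputs.
-- Loops are ported as structural recursion on a fuel argument that only makes them
-- total; the fuel given at the call sites is always sufficient.

-- characters that terminate a URL run: ' ', '\n', ')'
def pvStop (c : Char) : Bool := c == ' ' || c == '\n' || c == ')'

def pvHttp : List Char := ['h', 't', 't', 'p']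

-- ===== PORT A =====
-- inner while loop: advance end_pos while in range and not a stop character
def aEnd : List Char → Nat → Nat → Nat
  | _, e, 0 => e
  | t, e, f + 1 =>
    if h : e < t.length then
      if pvStop (t[e]'h) = false then aEnd t (e + 1) f else e
    else e

-- outer while loop of A: the list of appended pieces (Python's `result`)
def aLoop : List Char → Nat → Nat → List (List Char)
  | _, _, 0 => []
  | t, i, f + 1 =>
    if i < t.length then
      if PySem.Chars.findFrom t pvHttp (i : Int) none = -1 then
        [PySem.List.slice t (some (i : Int)) none]          -- result.append(text[i:]); break
      else
        PySem.List.slice t (some (i : Int))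
          (some ((PySem.Chars.findFrom t pvHttp (i : Int) none).toNat : Int)) ::   -- text[i:http_pos]
        (if 0 < (PySem.Chars.findFrom t pvHttp (i : Int) none).toNat ∧
            PySem.List.pyGet? t (((PySem.Chars.findFrom t pvHttp (i : Int) none).toNat : Int) - 1) = some '(' then
          -- already inside '(...)': append the url unchanged
          PySem.List.slice t (some ((PySem.Chars.findFrom t pvHttp (i : Int) none).toNat : Int))
            (some ((aEnd t (PySem.Chars.findFrom t pvHttp (i : Int) none).toNat
              (t.length - (PySem.Chars.findFrom t pvHttp (i : Int) none).toNat) : Nat) : Int))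
        else
          -- wrap: '[link](' + url + ')'
          ['[', 'l', 'i', 'n', 'k', ']', '('] ++
          PySem.List.slice t (some ((PySem.Chars.findFrom t pvHttp (i : Int) none).toNat : Int))
            (some ((aEnd t (PySem.Chars.findFrom t pvHttp (i : Int) none).toNat
              (t.length - (PySem.Chars.findFrom t pvHttp (i : Int) none).toNat) : Nat) : Int)) ++ [')']) ::
        aLoop t (aEnd t (PySem.Chars.findFrom t pvHttp (i : Int) none).toNat
          (t.length - (PySem.Chars.findFrom t pvHttp (i : Int) none).toNat)) f
    else []

def sanitize_markdown (text : String) : String :=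
  String.ofList (PySem.Chars.join [] (aLoop text.toList 0 text.toList.length))   -- ''.join(result)

-- ===== PORT B =====
-- the single left-to-right scan re.sub performs with pattern 'http[^ \n)]*':
-- at each position try to match the literal 'http' followed by the greedy run
-- of non-stop characters; on a match, emit the callback's replacement (prev =
-- the character preceding the match, m.group(0) = the matched run) and resume
-- after the match; otherwise emit the character and move on.
def bScan : Option Char → List Char → Nat → List Char
  | _, _, 0 => []
  | prev, s, f + 1 =>
    match s with
    | [] => []
    | c :: rest =>
      if pvHttp.isPrefixOf (c :: rest) then
        (if prev = some '(' then
          pvHttp ++ ((c :: rest).drop 4).takeWhile (fun ch => !pvStop ch)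
        else
          ['[', 'l', 'i', 'n', 'k', ']', '('] ++
          (pvHttp ++ ((c :: rest).drop 4).takeWhile (fun ch => !pvStop ch)) ++ [')']) ++
        bScan (pvHttp ++ ((c :: rest).drop 4).takeWhile (fun ch => !pvStop ch)).getLast?
          (((c :: rest).drop 4).dropWhile (fun ch => !pvStop ch)) f
      else
        c :: bScan (some c) rest f

def sanitize_markdown_alt (text : String) : String :=
  String.ofList (bScan none text.toList text.toList.length)

-- ===== PRECONDITION & SPEC =====
def Spec_sanitize_markdown (text : String) (out : String) : Prop := out = sanitize_markdown_alt text
instance (text : String) (out : String) : Decidable (Spec_sanitize_markdown text out) := by unfold Spec_sanitize_markdown; infer_instance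

-- ===== CLAIM (what is proved, stated in full; the proofs are below) =====
def Claim_equal_sanitize_markdown : Prop := ∀ (text : String), Dom_sanitize_markdown text → Spec_sanitize_markdown text (sanitize_markdown text)

-- ===== LEMMAS AND PROOFS =====

theorem pvJoin_nil_eq (xs : List (List Char)) : PySem.Chars.join [] xs = xs.flatten := by
  match xs with
  | [] => simp [PySem.Chars.join_nil]
  | [a] => simp [PySem.Chars.join_singleton]
  | a :: b :: r =>
    rw [PySem.Chars.join_cons_cons]
    simp [pvJoin_nil_eq (b :: r)]

theorem pvDropWhile_eq_drop (p : Char → Bool) (l : List Char) :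
    l.dropWhile p = l.drop (l.takeWhile p).length := by
  induction l with
  | nil => rfl
  | cons c r ih =>
    by_cases hp : p c <;> simp [hp, ih]

theorem pvAEnd_eq (f : Nat) (t : List Char) (e : Nat) (he : e ≤ t.length)
    (hf : t.length - e ≤ f) :
    aEnd t e f = e + ((t.drop e).takeWhile (fun c => !pvStop c)).length := by
  induction f generalizing e with
  | zero =>
    have h1 : t.drop e = [] := List.drop_eq_nil_of_le (by omega)
    simp [aEnd, h1]
  | succ f ih =>
    rw [aEnd]
    by_cases hlt : e < t.length
    · rw [dif_pos hlt, List.drop_eq_getElem_cons hlt, List.takeWhile_cons]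
      by_cases hs : pvStop t[e] = false
      · rw [if_pos hs, ih (e + 1) (by omega) (by omega)]
        simp [hs]
        omega
      · rw [if_neg hs]
        have hs' : pvStop t[e] = true := by
          rcases Bool.eq_false_or_eq_true (pvStop t[e]) with hh | hh
          · exact hh
          · exact absurd hh hs
        simp [hs']
    · rw [dif_neg hlt, List.drop_eq_nil_of_le (by omega)]
      simp
theorem pvPrefix_getElem? {l m : List Char} (h : l <+: m) {j : Nat} (hj : j < l.length) :
    m[j]? = l[j]? := by
  obtain ⟨u, rfl⟩ := h
  exact List.getElem?_append_left hj

theorem pvBScan_no (f : Nat) (s : List Char) (prev : Option Char) (hf : s.length ≤ f)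
    (h : ¬ (pvHttp <:+: s)) : bScan prev s f = s := by
  induction f generalizing s prev with
  | zero =>
    have h1 : s = [] := List.eq_nil_of_length_eq_zero (by omega)
    simp [h1, bScan]
  | succ f ih =>
    match s with
    | [] => simp [bScan]
    | c :: rest =>
      have hp : pvHttp.isPrefixOf (c :: rest) = false := by
        rcases Bool.eq_false_or_eq_true (pvHttp.isPrefixOf (c :: rest)) with hh | hh
        · exact absurd (List.isPrefixOf_iff_prefix.mp hh).isInfix h
        · exact hh
      rw [bScan, if_neg (by simp [hp])]
      rw [ih rest (some c) (by simpa using hf)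
        (fun hin => h (hin.trans (List.suffix_cons c rest).isInfix))]

theorem pvBScan_split (n : Nat) (s : List Char) (prev : Option Char) (f : Nat)
    (hn : n ≤ s.length) (hnf : n ≤ f)
    (hmin : ∀ j, j < n → ¬ (pvHttp <+: s.drop j)) :
    bScan prev s f = s.take n ++ bScan (if n = 0 then prev else s[n - 1]?) (s.drop n) (f - n) := by
  induction n generalizing s prev f with
  | zero => simp
  | succ n ih =>
    match s, f with
    | [], _ => simp at hn
    | c :: rest, f + 1 =>
      have h0 : ¬ (pvHttp <+: c :: rest) := by simpa using hmin 0 (Nat.succ_pos n)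
      have hp : pvHttp.isPrefixOf (c :: rest) = false := by
        rcases Bool.eq_false_or_eq_true (pvHttp.isPrefixOf (c :: rest)) with hh | hh
        · exact absurd (List.isPrefixOf_iff_prefix.mp hh) h0
        · exact hh
      rw [bScan, if_neg (by simp [hp])]
      rw [ih rest (some c) f (by simpa using hn) (by omega)
        (fun j hj => by simpa using hmin (j + 1) (by omega))]
      rw [Nat.succ_sub_succ]
      cases n with
      | zero => simp
      | succ m => simp

-- the main invariant: A's loop from index i produces what B's scan produces on
-- the suffix t.drop i, with prev = the character before position i, for any
-- sufficient amounts of fuel on either side.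
theorem pvMainAux (t : List Char) :
    ∀ (k i fb : Nat), t.length - i ≤ k → i ≤ t.length → t.length - i ≤ fb →
    (aLoop t i k).flatten = bScan (if i = 0 then none else t[i - 1]?) (t.drop i) fb := by
  intro k
  induction k with
  | zero =>
    intro i fb hk hi hfb
    have h1 : t.drop i = [] := List.drop_eq_nil_of_le (by omega)
    rw [h1]
    cases fb <;> simp [aLoop, bScan]
  | succ k ih =>
    intro i fb hk hi hfb
    by_cases hlt : i < t.length
    · rw [aLoop]
      by_cases hfp : PySem.Chars.findFrom t pvHttp (i : Int) none = -1
      · rw [if_pos hlt, if_pos hfp]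
        have hnof : PySem.Chars.find (t.drop i) pvHttp = -1 := by
          rw [PySem.Chars.findFrom_natCast t pvHttp i hi] at hfp
          by_cases hc : PySem.Chars.find (t.drop i) pvHttp = -1
          · exact hc
          · rw [if_neg hc] at hfp
            have h0 : (0:Int) ≤ PySem.Chars.find (t.drop i) pvHttp :=
              (PySem.Chars.find_nonneg_iff (t.drop i) pvHttp).mpr
                ((PySem.Chars.find_ne_neg_one_iff (t.drop i) pvHttp).mp hc)
            omega
        rw [pvBScan_no fb _ _ (by simp; omega)
          ((PySem.Chars.find_eq_neg_one_iff (t.drop i) pvHttp).mp hnof)]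
        simp [PySem.List.slice_from_natCast]
      · -- an occurrence of 'http' exists at position i + fn
        rw [if_pos hlt, if_neg hfp]
        have hiff := PySem.Chars.findFrom_natCast t pvHttp i hi
        have hnf : ¬ PySem.Chars.find (t.drop i) pvHttp = -1 := by
          intro hc; rw [hiff, if_pos hc] at hfp; exact hfp rfl
        have h0 : (0:Int) ≤ PySem.Chars.find (t.drop i) pvHttp :=
          (PySem.Chars.find_nonneg_iff (t.drop i) pvHttp).mpr
            ((PySem.Chars.find_ne_neg_one_iff (t.drop i) pvHttp).mp hnf)
        obtain ⟨hocc, hmin⟩ := PySem.Chars.find_spec h0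
        set fn := (PySem.Chars.find (t.drop i) pvHttp).toNat with hfn
        have hpval : (PySem.Chars.findFrom t pvHttp (i : Int) none).toNat = i + fn := by
          rw [hiff, if_neg hnf]; omega
        have hdd : (t.drop i).drop fn = t.drop (i + fn) := List.drop_drop
        rw [hdd] at hocc
        obtain ⟨body, hb⟩ := hocc
        have hplen : i + fn < t.length := by
          have := congrArg List.length hb
          simp [pvHttp] at this
          omega
        have hfnlt : fn < t.length - i := by omega
        have hae := pvAEnd_eq (t.length - (i + fn)) t (i + fn) (by omega) (Nat.le_refl _)
        set run := ((t.drop (i + fn)).takeWhile (fun c => !pvStop c)) with hrundef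
        obtain ⟨E, hEdef⟩ : ∃ E, aEnd t (i + fn) (t.length - (i + fn)) = E := ⟨_, rfl⟩
        have haeE : E = i + fn + run.length := by rw [← hEdef, hae]
        have hrunpre : run <+: t.drop (i + fn) := List.takeWhile_prefix _
        have hfh : (fun ch => !pvStop ch) 'h' = true := by decide
        have hft : (fun ch => !pvStop ch) 't' = true := by decide
        have hfq : (fun ch => !pvStop ch) 'p' = true := by decide
        have hrun4 : run = pvHttp ++ body.takeWhile (fun c => !pvStop c) := by
          rw [hrundef, ← hb]
          simp [pvHttp, hfh, hft, hfq]
        have hrunlen : 0 < run.length := by rw [hrun4]; simp [pvHttp]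
        have hrunle : run.length ≤ t.length - (i + fn) := by
          have := hrunpre.length_le
          simpa using this
        have hestep : i + fn + 1 ≤ E := by omega
        have hele : E ≤ t.length := by omega
        -- the url slice is exactly the takeWhile run
        have hurl : PySem.List.slice t (some ((i + fn : Nat) : Int))
            (some ((E : Nat) : Int)) = run := by
          rw [PySem.List.slice_natCast, haeE]
          have h1 : i + fn + run.length - (i + fn) = run.length := by omega
          rw [h1, ← List.prefix_iff_eq_take.mp hrunpre]
        have hpre : PySem.List.slice t (some (i : Int)) (some ((i + fn : Nat) : Int)) =
            (t.drop i).take fn := by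
          rw [PySem.List.slice_natCast, Nat.add_sub_cancel_left]
        -- the rest of the text after the run
        have htail : t.drop E = body.dropWhile (fun c => !pvStop c) := by
          rw [← hEdef, hae, ← List.drop_drop, hrundef, ← hb, ← pvDropWhile_eq_drop]
          simp [pvHttp, hfh, hft, hfq]
        -- the character preceding the continuation position is the run's last character
        have hlast : (if E = 0 then none else t[E - 1]?) = run.getLast? := by
          rw [if_neg (by omega), List.getLast?_eq_getElem?]
          have h1 : E - 1 = (i + fn) + (run.length - 1) := by omega
          rw [h1, ← List.getElem?_drop, pvPrefix_getElem? hrunpre (by omega)]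
        -- unfold one step of B at the occurrence
        have hpfx : pvHttp.isPrefixOf ('h' :: 't' :: 't' :: 'p' :: body) = true :=
          List.isPrefixOf_iff_prefix.mpr ⟨body, rfl⟩
        have hfb1 : fb - fn = (fb - fn - 1) + 1 := by omega
        have hscan : ∀ pr : Option Char, bScan pr (t.drop (i + fn)) (fb - fn) =
            (if pr = some '(' then run
             else ['[', 'l', 'i', 'n', 'k', ']', '('] ++ run ++ [')']) ++
            bScan run.getLast? (t.drop E) (fb - fn - 1) := by
          intro pr
          conv_lhs => rw [hfb1, ← hb, show pvHttp ++ body = 'h' :: 't' :: 't' :: 'p' :: body from rfl]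
          rw [bScan, if_pos hpfx]
          simp only [List.drop_succ_cons, List.drop_zero]
          rw [← hrun4, htail]
        -- the parenthesis test of A and of B agree
        have hcond : (0 < i + fn ∧
            PySem.List.pyGet? t (((i + fn : Nat) : Int) - 1) = some '(') ↔
            ((if i + fn = 0 then (none : Option Char) else t[i + fn - 1]?) = some '(') := by
          cases Nat.eq_zero_or_pos (i + fn) with
          | inl h => rw [h]; simp
          | inr h =>
            rw [if_neg (by omega)]
            have h1 : ((i + fn : Nat) : Int) - 1 = ((i + fn - 1 : Nat) : Int) := by omega
            rw [h1, PySem.List.pyGet?_natCast]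
            simp [h]
        -- assemble
        simp only [hpval, List.flatten_cons]
        rw [hEdef]
        rw [hpre, hurl, ih E (fb - fn - 1) (by omega) hele (by omega), hlast]
        rw [pvBScan_split fn (t.drop i) (if i = 0 then none else t[i - 1]?) fb
          (by rw [List.length_drop]; omega) (by omega) (fun j hj => hmin j (by omega))]
        have hprev : (if fn = 0 then (if i = 0 then none else t[i - 1]?)
            else (t.drop i)[fn - 1]?) = (if i + fn = 0 then (none : Option Char)
            else t[i + fn - 1]?) := by
          cases Nat.eq_zero_or_pos fn with
          | inl h =>
            simp [h]
          | inr h =>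
            rw [if_neg (by omega), if_neg (by omega), List.getElem?_drop]
            congr 1
            omega
        rw [hdd, hprev, hscan, if_congr hcond rfl rfl]
    · rw [aLoop, if_neg hlt]
      have h1 : t.drop i = [] := List.drop_eq_nil_of_le (by omega)
      rw [h1]
      cases fb <;> simp [bScan]

-- ===== VERDICT (by name: the statement is the Claim_ definition above) =====
theorem sanitize_markdown_spec : Claim_equal_sanitize_markdown := by
  intro text _
  unfold Spec_sanitize_markdown sanitize_markdown sanitize_markdown_alt
  rw [pvJoin_nil_eq, pvMainAux text.toList text.toList.length 0 text.toList.length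
    (by omega) (Nat.zero_le _) (by omega)]
  simp
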